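-- pv_equiv track=rewrite | github.com/ishangote/Coding-Interviews-Python | Leetcode/1216 Valid Palindrome III/valid_palindrome_iii.py | recursive_helper
-- ===== SOURCE A (Python) =====
-- def recursive_helper(lo, hi, k, memo, input_string):
--     if (lo, hi, k) in memo:
--         return memo[(lo, hi, k)]
--
--     if lo >= hi:
--         memo[(lo, hi, k)] = True
--
--     elif input_string[lo] == input_string[hi]:
--         memo[(lo, hi, k)] = recursive_helper(lo + 1, hi - 1, k, memo, input_string)
--
--     elif k == 0:
--         memo[(lo, hi, k)] = False
--
--     else:
--         memo[(lo, hi, k)] = recursive_helper(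
--             lo + 1, hi, k - 1, memo, input_string
--         ) or recursive_helper(lo, hi - 1, k - 1, memo, input_string)
--
--     return memo[(lo, hi, k)]
-- ===== SOURCE B (Python) =====
-- def _solve(lo, hi, k, memo, cache, s):
--     # walk inward over matching end pairs, consulting the caller's memo
--     # (read-only) at every state
--     while True:
--         if (lo, hi, k) in memo:
--             return memo[(lo, hi, k)]
--         if lo >= hi:
--             return True
--         if s[lo] != s[hi]:
--             break
--         lo += 1
--         hi -= 1
--     if k == 0:
--         return False
--     key = (lo, hi, k)
--     if key not in cache:
--         cache[key] = _solve(lo + 1, hi, k - 1, memo, cache, s) or _solve(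
--             lo, hi - 1, k - 1, memo, cache, s
--         )
--     return cache[key]
--
--
-- def recursive_helper(lo, hi, k, memo, input_string):
--     return _solve(lo, hi, k, memo, {}, input_string)
-- ===== Notes on version B (the rewrite author's own statement) =====
-- stated objective: alternative
-- what changed: B walks matching end pairs with an iterative two-pointer loop instead of one recursive call per pair, recurses only at mismatch states, and keeps the caller's memo read-only (A writes every visited state into it), memoizing only mismatch states in a private cache; equivalence is about the return value only since A mutates the memo argument.
import Mathlib
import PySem

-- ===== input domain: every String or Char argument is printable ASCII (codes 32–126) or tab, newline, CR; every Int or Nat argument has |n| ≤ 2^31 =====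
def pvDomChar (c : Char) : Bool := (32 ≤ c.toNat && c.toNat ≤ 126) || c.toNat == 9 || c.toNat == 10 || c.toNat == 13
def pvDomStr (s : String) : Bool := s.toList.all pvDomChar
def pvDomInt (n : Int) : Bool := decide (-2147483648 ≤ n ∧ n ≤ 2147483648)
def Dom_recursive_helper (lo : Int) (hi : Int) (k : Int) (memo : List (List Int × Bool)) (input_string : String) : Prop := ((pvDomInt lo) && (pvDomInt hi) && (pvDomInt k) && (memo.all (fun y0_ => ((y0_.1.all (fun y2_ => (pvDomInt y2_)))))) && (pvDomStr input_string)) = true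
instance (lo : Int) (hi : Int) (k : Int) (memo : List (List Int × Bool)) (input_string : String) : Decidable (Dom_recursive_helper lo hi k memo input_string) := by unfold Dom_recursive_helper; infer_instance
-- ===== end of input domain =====

-- B consults the caller's memo read-only and walks matching end pairs iteratively,
-- memoizing (in a private cache) only mismatch states; the equivalence is about the
-- RETURN value only: A writes every visited state into the caller's memo dict, B does not mutate it.

-- ===== PORT A =====
-- small arithmetic facts cited by the termination proofs of both ports
theorem rhDecPair (lo hi : Int) (h : ¬ lo ≥ hi) :
    (hi - 1 - (lo + 1)).toNat < (hi - lo).toNat := by omega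
theorem rhDecLeft (lo hi : Int) (h : ¬ lo ≥ hi) :
    (hi - (lo + 1)).toNat < (hi - lo).toNat := by omega
theorem rhDecRight (lo hi : Int) (h : ¬ lo ≥ hi) :
    (hi - 1 - lo).toNat < (hi - lo).toNat := by omega
theorem rhDecInnerLeft (lo hi l h : Int) (h1 : lo ≤ l) (h2 : h ≤ hi) (h3 : l < h) :
    (h - (l + 1)).toNat < (hi - lo).toNat := by omega
theorem rhDecInnerRight (lo hi l h : Int) (h1 : lo ≤ l) (h2 : h ≤ hi) (h3 : l < h) :
    (h - 1 - l).toNat < (hi - lo).toNat := by omega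

-- memoized top-down recursion, threading the mutated memo dict through the recursion
def recursive_helper_goA (lo : Int) (hi : Int) (k : Int)
    (memo : PySem.Dict (List Int) Bool) (s : List Char) :
    PySem.Dict (List Int) Bool × Bool :=
  match memo.get? [lo, hi, k] with
  | some b => (memo, b)
  | none =>
    if lo ≥ hi then (memo.insert [lo, hi, k] true, true)
    else
      match PySem.List.pyGet? s lo, PySem.List.pyGet? s hi with
      | some a, some c =>
        if a = c then
          let r := recursive_helper_goA (lo + 1) (hi - 1) k memo s
          (r.1.insert [lo, hi, k] r.2, r.2)
        else if k = 0 then (memo.insert [lo, hi, k] false, false)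
        else
          let r1 := recursive_helper_goA (lo + 1) hi (k - 1) memo s
          if r1.2 then (r1.1.insert [lo, hi, k] true, true)
          else
            let r2 := recursive_helper_goA lo (hi - 1) (k - 1) r1.1 s
            (r2.1.insert [lo, hi, k] r2.2, r2.2)
      | _, _ => (memo, false)  -- Python raises IndexError here; excluded by Pre_
termination_by (hi - lo).toNat
decreasing_by
  · exact rhDecPair lo hi (by assumption)
  · exact rhDecLeft lo hi (by assumption)
  · exact rhDecRight lo hi (by assumption)

def recursive_helper (lo : Int) (hi : Int) (k : Int) (memo : List (List Int × Bool)) (input_string : String) : Bool :=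
  (recursive_helper_goA lo hi k (PySem.Dict.mk memo) input_string.toList).2

-- ===== PORT B =====
-- the while loop of Source B: skip matching end pairs, consulting the caller's memo at each state;
-- .inl b = an answer, .inr (l, h) = the first mismatch state
def recursive_helper_shrinkB (lo : Int) (hi : Int) (k : Int)
    (memo : PySem.Dict (List Int) Bool) (s : List Char) :
    Sum Bool {p : Int × Int // lo ≤ p.1 ∧ p.2 ≤ hi ∧ p.1 < p.2} :=
  match memo.get? [lo, hi, k] with
  | none =>
    if hge : lo ≥ hi then .inl true
    else
      match PySem.List.pyGet? s lo with
      | none => .inl false  -- Python raises IndexError here; excluded by Pre_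
      | some a =>
        match PySem.List.pyGet? s hi with
        | none => .inl false  -- Python raises IndexError here; excluded by Pre_
        | some c =>
          if a = c then
            match recursive_helper_shrinkB (lo + 1) (hi - 1) k memo s with
            | .inl b => .inl b
            | .inr ⟨p, hp⟩ =>
              .inr ⟨p, le_trans (le_of_lt (lt_add_one lo)) hp.1,
                       le_trans hp.2.1 (le_of_lt (sub_one_lt hi)), hp.2.2⟩
          else .inr ⟨(lo, hi), le_refl lo, le_refl hi, lt_of_not_ge hge⟩
  | some b => .inl b
termination_by (hi - lo).toNat
decreasing_by exact rhDecPair lo hi (by assumption)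

def recursive_helper_goB (lo : Int) (hi : Int) (k : Int)
    (memo cache : PySem.Dict (List Int) Bool) (s : List Char) :
    PySem.Dict (List Int) Bool × Bool :=
  match recursive_helper_shrinkB lo hi k memo s with
  | .inl b => (cache, b)
  | .inr ⟨(l, h), hlh⟩ =>
    if k = 0 then (cache, false)
    else
      match cache.get? [l, h, k] with
      | none =>
        let r1 := recursive_helper_goB (l + 1) h (k - 1) memo cache s
        if r1.2 then (r1.1.insert [l, h, k] true, true)
        else
          let r2 := recursive_helper_goB l (h - 1) (k - 1) memo r1.1 s
          (r2.1.insert [l, h, k] r2.2, r2.2)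
      | some b => (cache, b)
termination_by (hi - lo).toNat
decreasing_by
  · exact rhDecInnerLeft lo hi l h hlh.1 hlh.2.1 hlh.2.2
  · exact rhDecInnerRight lo hi l h hlh.1 hlh.2.1 hlh.2.2

def recursive_helper_alt (lo : Int) (hi : Int) (k : Int) (memo : List (List Int × Bool)) (input_string : String) : Bool :=
  (recursive_helper_goB lo hi k (PySem.Dict.mk memo) PySem.Dict.empty input_string.toList).2

-- ===== PRECONDITION & SPEC =====
-- Pre_ excludes exactly the inputs on which Python A raises (IndexError on an
-- out-of-range character access, reached when the top key is not memoized and lo < hi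
-- but lo or hi falls outside the valid index range [-len, len)).
def Pre_recursive_helper (lo : Int) (hi : Int) (k : Int) (memo : List (List Int × Bool)) (input_string : String) : Prop :=
  ([lo, hi, k] ∈ memo.map Prod.fst) ∨ lo ≥ hi ∨
    (-(PySem.Str.len input_string) ≤ lo ∧ hi < PySem.Str.len input_string)
instance (lo : Int) (hi : Int) (k : Int) (memo : List (List Int × Bool)) (input_string : String) : Decidable (Pre_recursive_helper lo hi k memo input_string) := by unfold Pre_recursive_helper; infer_instance

def pvWitness_recursive_helper : Int × Int × Int × (List (List Int × Bool)) × String := (0, 3, 1, [], "abca")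

def Spec_recursive_helper (lo : Int) (hi : Int) (k : Int) (memo : List (List Int × Bool)) (input_string : String) (out : Bool) : Prop := out = recursive_helper_alt lo hi k memo input_string
instance (lo : Int) (hi : Int) (k : Int) (memo : List (List Int × Bool)) (input_string : String) (out : Bool) : Decidable (Spec_recursive_helper lo hi k memo input_string out) := by unfold Spec_recursive_helper; infer_instance

-- ===== CLAIM (what is proved, stated in full; the proofs are below) =====
def Claim_equal_recursive_helper : Prop := ∀ (lo : Int) (hi : Int) (k : Int) (memo : List (List Int × Bool)) (input_string : String), Dom_recursive_helper lo hi k memo input_string → Pre_recursive_helper lo hi k memo input_string → Spec_recursive_helper lo hi k memo input_string (recursive_helper lo hi k memo input_string)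

-- ===== LEMMAS AND PROOFS =====

-- the pure value both programs compute: the recursion of A with the ORIGINAL memo
-- consulted read-only (no writes)
def rhPure (lo : Int) (hi : Int) (k : Int)
    (memo : PySem.Dict (List Int) Bool) (s : List Char) : Bool :=
  match memo.get? [lo, hi, k] with
  | some b => b
  | none =>
    if lo ≥ hi then true
    else
      match PySem.List.pyGet? s lo, PySem.List.pyGet? s hi with
      | some a, some c =>
        if a = c then rhPure (lo + 1) (hi - 1) k memo s
        else if k = 0 then false
        else rhPure (lo + 1) hi (k - 1) memo s || rhPure lo (hi - 1) (k - 1) memo s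
      | _, _ => false
termination_by (hi - lo).toNat
decreasing_by
  · exact rhDecPair lo hi (by assumption)
  · exact rhDecLeft lo hi (by assumption)
  · exact rhDecRight lo hi (by assumption)

-- invariant for A's threaded memo: every stored triple holds the pure value,
-- and no key of the original memo has been lost
def rhInvA (memo0 m : PySem.Dict (List Int) Bool) (s : List Char) : Prop :=
  (∀ l h kk b, m.get? [l, h, kk] = some b → b = rhPure l h kk memo0 s) ∧
  (∀ key : List Int, m.get? key = none → memo0.get? key = none)

theorem rhInvA_insert (memo0 m : PySem.Dict (List Int) Bool) (s : List Char)
    (l h kk : Int) (v : Bool) (hInv : rhInvA memo0 m s)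
    (hv : v = rhPure l h kk memo0 s) :
    rhInvA memo0 (m.insert [l, h, kk] v) s := by
  constructor
  · intro l' h' kk' b hb
    rw [PySem.Dict.get?_insert] at hb
    split_ifs at hb with hk
    · obtain ⟨h1, h2, h3⟩ : l' = l ∧ h' = h ∧ kk' = kk := by simpa using hk
      subst h1; subst h2; subst h3
      have hvb : v = b := Option.some.inj hb
      subst hvb
      exact hv
    · exact hInv.1 _ _ _ _ hb
  · intro key hkey
    rw [PySem.Dict.get?_insert] at hkey
    split_ifs at hkey
    exact hInv.2 key hkey

theorem rhGoA_eq (memo0 : PySem.Dict (List Int) Bool) (s : List Char) :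
    ∀ (lo hi k : Int) (m : PySem.Dict (List Int) Bool), rhInvA memo0 m s →
      (recursive_helper_goA lo hi k m s).2 = rhPure lo hi k memo0 s ∧
      rhInvA memo0 (recursive_helper_goA lo hi k m s).1 s := by
  intro lo hi k m
  fun_induction recursive_helper_goA lo hi k m s
  case case1 lo hi k m b hm =>
    intro hInv
    exact ⟨hInv.1 lo hi k b hm, hInv⟩
  case case2 lo hi k m hm hge =>
    intro hInv
    have hp : rhPure lo hi k memo0 s = true := by
      rw [rhPure]; simp [hInv.2 _ hm, hge]
    exact ⟨hp.symm, rhInvA_insert memo0 m s lo hi k true hInv hp.symm⟩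
  case case3 lo hi k m hm hge c hc r ha ih =>
    intro hInv
    obtain ⟨hb, hInv'⟩ := ih hInv
    have hp : rhPure lo hi k memo0 s = rhPure (lo + 1) (hi - 1) k memo0 s := by
      rw [rhPure]; simp [hInv.2 _ hm, hge, ha, hc]
    have hv : r.2 = rhPure lo hi k memo0 s := by rw [hp]; exact hb
    exact ⟨hv, rhInvA_insert memo0 r.1 s lo hi k r.2 hInv' hv⟩
  case case4 lo hi m hge a c hc ha hac hm =>
    intro hInv
    have hp : rhPure lo hi 0 memo0 s = false := by
      rw [rhPure]; simp [hInv.2 _ hm, hge, ha, hc, hac]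
    exact ⟨hp.symm, rhInvA_insert memo0 m s lo hi 0 false hInv hp.symm⟩
  case case5 lo hi k m hm hge a c hc ha hac hk r1 hr1 ih1 =>
    intro hInv
    obtain ⟨hb1, hInv1⟩ := ih1 hInv
    have hb1' : rhPure (lo + 1) hi (k - 1) memo0 s = true := by
      rw [← hb1]; exact hr1
    have hp : rhPure lo hi k memo0 s = true := by
      rw [rhPure]; simp [hInv.2 _ hm, hge, ha, hc, hac, hk, hb1']
    exact ⟨hp.symm, rhInvA_insert memo0 r1.1 s lo hi k true hInv1 hp.symm⟩
  case case6 lo hi k m hm hge a c hc ha hac hk r1 hr1 r2 ih2 ih1 =>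
    intro hInv
    obtain ⟨hb1, hInv1⟩ := ih2 hInv
    obtain ⟨hb2, hInv2⟩ := ih1 hInv1
    have hb1' : rhPure (lo + 1) hi (k - 1) memo0 s = false := by
      rw [← hb1]; simpa using hr1
    have hp : rhPure lo hi k memo0 s
        = rhPure lo (hi - 1) (k - 1) memo0 s := by
      rw [rhPure]; simp [hInv.2 _ hm, hge, ha, hc, hac, hk, hb1']
    have hv : r2.2 = rhPure lo hi k memo0 s := by rw [hp]; exact hb2
    exact ⟨hv, rhInvA_insert memo0 r2.1 s lo hi k r2.2 hInv2 hv⟩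
  case case7 lo hi k m hm hge hnone =>
    intro hInv
    have hp : rhPure lo hi k memo0 s = false := by
      rw [rhPure]
      rcases hl : PySem.List.pyGet? s lo with _ | a
      · simp [hInv.2 _ hm, hge]
      · rcases hh : PySem.List.pyGet? s hi with _ | c
        · simp [hInv.2 _ hm, hge]
        · exact (hnone a c hl hh).elim
    exact ⟨hp.symm, hInv⟩

theorem rhA_eq_pure (lo hi k : Int) (memo0 : PySem.Dict (List Int) Bool) (s : List Char) :
    (recursive_helper_goA lo hi k memo0 s).2 = rhPure lo hi k memo0 s := by
  refine (rhGoA_eq memo0 s lo hi k memo0 ?_).1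
  constructor
  · intro l h kk b hb
    rw [rhPure, hb]
  · intro _ h
    exact h

-- characterisation of the shrink loop
theorem rhShrinkB_inl (memo0 : PySem.Dict (List Int) Bool) (s : List Char)
    (lo hi k : Int) (b : Bool)
    (heq : recursive_helper_shrinkB lo hi k memo0 s = .inl b) :
    rhPure lo hi k memo0 s = b := by
  fun_induction recursive_helper_shrinkB lo hi k memo0 s <;>
    (rw [rhPure]; simp_all)

theorem rhShrinkB_inr (memo0 : PySem.Dict (List Int) Bool) (s : List Char)
    (lo hi k : Int) (l h : Int)
    (heq : ∃ hp, recursive_helper_shrinkB lo hi k memo0 s = .inr ⟨(l, h), hp⟩) :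
    rhPure lo hi k memo0 s = rhPure l h k memo0 s ∧
    memo0.get? [l, h, k] = none ∧ l < h ∧
    ∃ a c, PySem.List.pyGet? s l = some a ∧ PySem.List.pyGet? s h = some c ∧ a ≠ c := by
  obtain ⟨hp, heq⟩ := heq
  fun_induction recursive_helper_shrinkB lo hi k memo0 s
  case case1 lo hi hm hge => exact absurd heq (by simp)
  case case2 lo hi hm hge hla => exact absurd heq (by simp)
  case case3 lo hi hm hge a hla hhc => exact absurd heq (by simp)
  case case4 lo hi hm hge c hc b hrec ha ih => exact absurd heq (by simp)
  case case5 lo hi hm hge c hc p hpp hrec ha ih =>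
    have hpv : p = (l, h) := congrArg Subtype.val (Sum.inr.inj heq)
    subst hpv
    obtain ⟨hpe, hm0, hlh, rest⟩ := ih hpp hrec
    refine ⟨?_, hm0, hlh, rest⟩
    have hstep : rhPure lo hi k memo0 s = rhPure (lo + 1) (hi - 1) k memo0 s := by
      rw [rhPure]; simp [hm, hge, ha, hc]
    rw [hstep, hpe]
  case case6 lo hi hm hge a ha c hc hac =>
    have hpv : (lo, hi) = (l, h) := congrArg Subtype.val (Sum.inr.inj heq)
    have e1 : lo = l := congrArg Prod.fst hpv
    have e2 : hi = h := congrArg Prod.snd hpv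
    subst e1; subst e2
    exact ⟨rfl, hm, lt_of_not_ge hge, a, c, ha, hc, hac⟩
  case case7 lo hi b hm => exact absurd heq (by simp)

def rhInvB (memo0 c : PySem.Dict (List Int) Bool) (s : List Char) : Prop :=
  ∀ l h kk b, c.get? [l, h, kk] = some b → b = rhPure l h kk memo0 s

theorem rhInvB_insert (memo0 c : PySem.Dict (List Int) Bool) (s : List Char)
    (l h kk : Int) (v : Bool) (hInv : rhInvB memo0 c s)
    (hv : v = rhPure l h kk memo0 s) :
    rhInvB memo0 (c.insert [l, h, kk] v) s := by
  intro l' h' kk' b hb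
  rw [PySem.Dict.get?_insert] at hb
  split_ifs at hb with hk
  · obtain ⟨h1, h2, h3⟩ : l' = l ∧ h' = h ∧ kk' = kk := by simpa using hk
    subst h1; subst h2; subst h3
    have hvb : v = b := Option.some.inj hb
    subst hvb
    exact hv
  · exact hInv _ _ _ _ hb

theorem rhGoB_eq (memo0 : PySem.Dict (List Int) Bool) (s : List Char) :
    ∀ (lo hi k : Int) (c : PySem.Dict (List Int) Bool), rhInvB memo0 c s →
      (recursive_helper_goB lo hi k memo0 c s).2 = rhPure lo hi k memo0 s ∧
      rhInvB memo0 (recursive_helper_goB lo hi k memo0 c s).1 s := by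
  intro lo hi k c
  fun_induction recursive_helper_goB lo hi k memo0 c s
  case case1 lo hi k cache b hsh =>
    intro hInv
    exact ⟨(rhShrinkB_inl memo0 s lo hi k b hsh).symm, hInv⟩
  case case2 lo hi cache l h hlh hsh =>
    intro hInv
    obtain ⟨hpe, hm0, hlhp, a, cc, hla, hhc, hac⟩ :=
      rhShrinkB_inr memo0 s lo hi 0 l h ⟨hlh, hsh⟩
    have hp : rhPure lo hi 0 memo0 s = false := by
      rw [hpe, rhPure]
      simp [hm0, hla, hhc, hac, show ¬ l ≥ h by omega]
    exact ⟨hp.symm, hInv⟩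
  case case5 lo hi k cache l h hlh hsh hk b hb =>
    intro hInv
    obtain ⟨hpe, _⟩ := rhShrinkB_inr memo0 s lo hi k l h ⟨hlh, hsh⟩
    exact ⟨(hInv l h k b hb).trans hpe.symm, hInv⟩
  case case3 lo hi k cache l h hlh hsh hk hc r1 hr1 ih1 =>
    intro hInv
    obtain ⟨hpe, hm0, hlhp, a, cc, hla, hhc, hac⟩ :=
      rhShrinkB_inr memo0 s lo hi k l h ⟨hlh, hsh⟩
    obtain ⟨hb1, hInv1⟩ := ih1 hInv
    have hb1' : rhPure (l + 1) h (k - 1) memo0 s = true := by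
      rw [← hb1]; exact hr1
    have hp : rhPure l h k memo0 s = true := by
      rw [rhPure]
      simp [hm0, hla, hhc, hac, hk, hb1', show ¬ l ≥ h by omega]
    exact ⟨(hpe.trans hp).symm,
      rhInvB_insert memo0 r1.1 s l h k true hInv1 hp.symm⟩
  case case4 lo hi k cache l h hlh hsh hk hc r1 hr1 r2 ih2 ih1 =>
    intro hInv
    obtain ⟨hpe, hm0, hlhp, a, cc, hla, hhc, hac⟩ :=
      rhShrinkB_inr memo0 s lo hi k l h ⟨hlh, hsh⟩
    obtain ⟨hb1, hInv1⟩ := ih2 hInv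
    obtain ⟨hb2, hInv2⟩ := ih1 hInv1
    have hb1' : rhPure (l + 1) h (k - 1) memo0 s = false := by
      rw [← hb1]; simpa using hr1
    have hp : rhPure l h k memo0 s = rhPure l (h - 1) (k - 1) memo0 s := by
      rw [rhPure]
      simp [hm0, hla, hhc, hac, hk, hb1', show ¬ l ≥ h by omega]
    have hv : r2.2 = rhPure l h k memo0 s := by rw [hp]; exact hb2
    exact ⟨hv.trans hpe.symm,
      rhInvB_insert memo0 r2.1 s l h k r2.2 hInv2 hv⟩

theorem rhB_eq_pure (lo hi k : Int) (memo0 : PySem.Dict (List Int) Bool) (s : List Char) :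
    (recursive_helper_goB lo hi k memo0 PySem.Dict.empty s).2 = rhPure lo hi k memo0 s := by
  refine (rhGoB_eq memo0 s lo hi k PySem.Dict.empty ?_).1
  intro l h kk b hb
  simp [PySem.Dict.get?_empty] at hb

-- ===== VERDICT (by name: the statement is the Claim_ definition above) =====
theorem recursive_helper_spec : Claim_equal_recursive_helper := by
  intro lo hi k memo input_string _ _
  unfold Spec_recursive_helper recursive_helper recursive_helper_alt
  rw [rhA_eq_pure, rhB_eq_pure]
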